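-- pv_equiv track=rewrite | github.com/Quenel/AX-1-Playing-Pegs | Algorithms.py | possible_final_paths
-- ===== SOURCE A (Python) =====
-- def possible_final_paths(gameboard):
--    paths = []
--    alter = []
--    saveString = []
--    for i in range(len(gameboard)):
--       alter.append('o')
--
--    for m in range(len(gameboard)):
--       saveString = alter
--       for i in range(len(gameboard)):
--          if m!= i:
--             saveString[i] = 'o'
--          saveString[m] = 'X'
--       paths.append(''.join(saveString))
--    return paths
-- ===== SOURCE B (Python) =====
-- def possible_final_paths(gameboard):
--     n = len(gameboard)
--     return ['o' * m + 'X' + 'o' * (n - 1 - m) for m in range(n)]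
-- ===== Notes on version B (the rewrite author's own statement) =====
-- stated objective: simpler
-- what changed: Each row is built in one step by closed-form string repetition 'o'*m + 'X' + 'o'*(n-1-m), replacing the aliased mutable character list, the inner per-index reset/set loop and the join.
import Mathlib
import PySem

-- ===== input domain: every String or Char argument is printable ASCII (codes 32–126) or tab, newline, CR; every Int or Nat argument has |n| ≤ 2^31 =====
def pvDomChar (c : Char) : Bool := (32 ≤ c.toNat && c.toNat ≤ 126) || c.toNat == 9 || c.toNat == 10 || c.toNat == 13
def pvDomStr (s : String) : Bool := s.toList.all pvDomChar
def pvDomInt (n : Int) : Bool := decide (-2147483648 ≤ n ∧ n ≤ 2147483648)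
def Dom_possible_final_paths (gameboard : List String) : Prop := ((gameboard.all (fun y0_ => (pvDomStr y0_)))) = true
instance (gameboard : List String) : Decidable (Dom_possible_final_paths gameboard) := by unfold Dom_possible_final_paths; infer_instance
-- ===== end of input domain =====

-- B builds each row in one step by closed-form repetition 'o'*m + 'X' + 'o'*(n-1-m),
-- replacing A's aliased mutable character list, inner per-index reset/set loop and join (objective: simpler).

-- ===== PORT A =====
-- one step of A's inner loop body: if m != i: saveString[i]='o'; saveString[m]='X'
def pfpStep (m : Nat) (s : List Char) (i : Nat) : List Char :=
  (if m ≠ i then s.set i 'o' else s).set m 'X'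

-- the inner 'for i in range(len(gameboard))' loop
def pfpInner (n m : Nat) (s : List Char) : List Char :=
  (List.range n).foldl (pfpStep m) s

def possible_final_paths (gameboard : List String) : List String :=
  let alter := (List.range gameboard.length).foldl (fun a _ => a ++ ['o']) []
  -- outer loop: saveString = alter aliases, so the (mutated) list is threaded as state .2
  ((List.range gameboard.length).foldl
    (fun (st : List String × List Char) m =>
      let s := pfpInner gameboard.length m st.2
      (st.1 ++ [String.ofList s], s))
    ([], alter)).1

-- ===== PORT B =====
-- 'o'*m + 'X' + 'o'*(n-1-m) ported over List Char (exact: concatenation/repetition of ASCII chars)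
def possible_final_paths_alt (gameboard : List String) : List String :=
  (List.range gameboard.length).map
    (fun m => String.ofList (List.replicate m 'o' ++ 'X' :: List.replicate (gameboard.length - 1 - m) 'o'))

-- ===== PRECONDITION & SPEC =====
def Spec_possible_final_paths (gameboard : List String) (out : List String) : Prop := out = possible_final_paths_alt gameboard
instance (gameboard : List String) (out : List String) : Decidable (Spec_possible_final_paths gameboard out) := by unfold Spec_possible_final_paths; infer_instance

-- ===== CLAIM (what is proved, stated in full; the proofs are below) =====
def Claim_equal_possible_final_paths : Prop := ∀ (gameboard : List String), Dom_possible_final_paths gameboard → Spec_possible_final_paths gameboard (possible_final_paths gameboard)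

-- ===== LEMMAS AND PROOFS =====

theorem pfpStep_length (m : Nat) (s : List Char) (i : Nat) :
    (pfpStep m s i).length = s.length := by
  unfold pfpStep; split <;> simp

theorem pfp_foldl_length (m : Nat) (l : List Nat) (s : List Char) :
    (l.foldl (pfpStep m) s).length = s.length := by
  induction l generalizing s with
  | nil => rfl
  | cons i l ih => simp [List.foldl, ih, pfpStep_length]

theorem pfp_aux (n m : Nat) (hm : m < n) (k : Nat) (hk : k ≤ n) (s : List Char)
    (hs : s.length = n) (j : Nat) :
    ((List.range k).foldl (pfpStep m) s)[j]? =
      if j = m ∧ 0 < k then some 'X'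
      else if j < k ∧ j ≠ m then some 'o'
      else s[j]? := by
  induction k with
  | zero => simp
  | succ k ih =>
    have hk' : k ≤ n := Nat.le_of_succ_le hk
    have ih' := ih hk'
    rw [List.range_succ, List.foldl_append, List.foldl_cons, List.foldl_nil]
    set t := (List.range k).foldl (pfpStep m) s with ht
    have hlen : t.length = n := by rw [ht, pfp_foldl_length]; exact hs
    have hinlen : (if m ≠ k then t.set k 'o' else t).length = n := by
      split <;> simp [hlen]
    show ((if m ≠ k then t.set k 'o' else t).set m 'X')[j]? = _
    rw [List.getElem?_set]
    by_cases hjm : j = m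
    · subst hjm
      simp only [hinlen, if_pos hm]
      simp
    · have h1 : ¬ (m = j) := fun h => hjm h.symm
      rw [if_neg h1]
      by_cases hmk : m = k
      · subst hmk
        rw [if_neg (by simp)]
        rw [ih']
        by_cases hlt : j < m
        · simp [hjm, hlt, Nat.lt_succ_of_lt hlt]
        · have h4 : ¬ j ≤ m := by omega
          simp [hjm, hlt, h4]
      · rw [if_pos hmk]
        rw [List.getElem?_set]
        by_cases hkj : k = j
        · subst hkj
          rw [if_pos rfl, if_pos (by omega : k < t.length)]
          have : (k < k + 1 ∧ k ≠ m) := by omega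
          simp [hjm, this]
        · rw [if_neg hkj, ih']
          by_cases hlt : j < k
          · simp [hjm, hlt, Nat.lt_succ_of_lt hlt]
          · have h4 : ¬ j ≤ k := by omega
            simp [hjm, hlt, h4]

theorem pfpRow_getElem? (n m : Nat) (hm : m < n) (j : Nat) :
    (List.replicate m 'o' ++ 'X' :: List.replicate (n - 1 - m) 'o')[j]? =
      if j = m then some 'X'
      else if j < n then some 'o'
      else none := by
  rcases Nat.lt_trichotomy j m with h | h | h
  · rw [List.getElem?_append_left (by simpa using h)]
    simp only [List.getElem?_replicate, if_pos h]
    have h1 : j ≠ m := by omega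
    have h2 : j < n := by omega
    simp [h1, h2]
  · subst h
    rw [List.getElem?_append_right (by simp)]
    simp
  · rw [List.getElem?_append_right (by simp; omega)]
    simp only [List.length_replicate]
    have h2 : j - m = (j - m - 1) + 1 := by omega
    rw [h2, List.getElem?_cons_succ, List.getElem?_replicate]
    have hne : j ≠ m := by omega
    by_cases hjn : j < n
    · have h3 : j - m - 1 < n - 1 - m := by omega
      simp [hne, hjn, h3]
    · have h3 : ¬ j - m - 1 < n - 1 - m := by omega
      simp [hne, hjn, h3]

theorem pfpInner_eq (n m : Nat) (hm : m < n) (s : List Char) (hs : s.length = n) :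
    pfpInner n m s = List.replicate m 'o' ++ 'X' :: List.replicate (n - 1 - m) 'o' := by
  apply List.ext_getElem?
  intro j
  unfold pfpInner
  rw [pfp_aux n m hm n le_rfl s hs j, pfpRow_getElem? n m hm j]
  have h0 : 0 < n := by omega
  by_cases hjm : j = m
  · simp [hjm, h0]
  · by_cases hjn : j < n
    · simp [hjm, hjn]
    · have hle : s.length ≤ j := by omega
      simp [hjm, hjn, List.getElem?_eq_none hle]

theorem pfpAlter_eq (n : Nat) :
    (List.range n).foldl (fun a _ => a ++ ['o']) ([] : List Char) = List.replicate n 'o' := by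
  induction n with
  | zero => rfl
  | succ n ih =>
    rw [List.range_succ, List.foldl_append, ih]
    simp [List.replicate_succ']

theorem pfpOuter (n : Nat) (l : List Nat) (hl : ∀ m ∈ l, m < n)
    (p : List String) (s : List Char) (hs : s.length = n) :
    (l.foldl (fun (st : List String × List Char) m =>
        let s := pfpInner n m st.2
        (st.1 ++ [String.ofList s], s)) (p, s)).1 =
      p ++ l.map (fun m => String.ofList (List.replicate m 'o' ++ 'X' :: List.replicate (n - 1 - m) 'o')) := by
  induction l generalizing p s with
  | nil => simp
  | cons m l ih =>
    have hm : m < n := hl m (List.mem_cons_self ..)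
    simp only [List.foldl_cons]
    rw [pfpInner_eq n m hm s hs]
    rw [ih (fun m' h => hl m' (List.mem_cons_of_mem _ h)) _ _ (by simp; omega)]
    simp

-- ===== VERDICT (by name: the statement is the Claim_ definition above) =====
theorem possible_final_paths_spec : Claim_equal_possible_final_paths := by
  intro gameboard _
  unfold Spec_possible_final_paths possible_final_paths possible_final_paths_alt
  rw [pfpAlter_eq]
  rw [pfpOuter gameboard.length (List.range gameboard.length)
      (fun m hm => List.mem_range.mp hm) [] _ (by simp)]
  simp
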